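-- pv_equiv track=rewrite | github.com/kagaya85/TraceCluster | TraceAnomaly/utils.py | get_unique_service_sequence
-- ===== SOURCE A (Python) =====
-- def get_unique_service_sequence(service_sequence: dict):
--     service_count = {}
--     for v in service_sequence:
--         if service_count.get(v) is None:
--             service_count[v] = 0
--         service_count[v] += 1
--     result = ""
--     unique_sequence = set(service_sequence)
--     for v in sorted(unique_sequence):
--         result = result + v + str(service_count[v]) + " "
--     return result
-- ===== SOURCE B (Python) =====
-- def get_unique_service_sequence(service_sequence):
--     # Sort once, then emit one piece per run of equal elements (no dict, no set).
--     pieces = []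
--     rest = sorted(service_sequence)
--     while rest:
--         x = rest[0]
--         k = 1
--         while k < len(rest) and rest[k] == x:
--             k += 1
--         pieces.append(x + str(k) + " ")
--         rest = rest[k:]
--     return "".join(pieces)
-- ===== Notes on version B (the rewrite author's own statement) =====
-- stated objective: alternative
-- what changed: Replaces the count-into-a-dict pass plus sorted(set(...)) pass by a single sort of the whole input followed by one run-grouping scan that emits element+str(runlength)+' ' per run; no dictionary or set is built.
import Mathlib
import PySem

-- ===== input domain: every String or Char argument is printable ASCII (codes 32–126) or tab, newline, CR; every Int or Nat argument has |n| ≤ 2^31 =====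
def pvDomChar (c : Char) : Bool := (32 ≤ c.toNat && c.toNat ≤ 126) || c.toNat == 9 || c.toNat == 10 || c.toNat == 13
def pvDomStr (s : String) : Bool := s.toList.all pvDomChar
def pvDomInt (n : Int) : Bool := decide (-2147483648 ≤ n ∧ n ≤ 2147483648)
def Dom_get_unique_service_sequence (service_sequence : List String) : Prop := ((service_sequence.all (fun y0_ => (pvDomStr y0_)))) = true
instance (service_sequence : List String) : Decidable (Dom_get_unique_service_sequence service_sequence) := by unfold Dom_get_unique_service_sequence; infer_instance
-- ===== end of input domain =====

-- B replaces A's dict-count + sorted(set(...)) passes by one sort of the whole list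
-- followed by a single run-grouping scan (alternative decomposition, same asymptotics).

-- ===== PORT A =====
-- the counting loop: 'if service_count.get(v) is None: service_count[v] = 0; service_count[v] += 1'
-- (service_count[v] is total here because the key was just ensured present, hence getD is exact)
def get_unique_service_sequence (service_sequence : List String) : String :=
  let service_count : PySem.Dict String Int :=
    service_sequence.foldl (fun d v =>
      let d := if (PySem.Dict.get? d v) = none then PySem.Dict.insert d v 0 else d
      PySem.Dict.insert d v (PySem.Dict.getD d v 0 + 1)) PySem.Dict.empty
  let unique_sequence : PySem.Set String := PySem.Set.ofList service_sequence
  (PySem.List.sorted unique_sequence (fun x => x) false).foldl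
    (fun result v => result ++ v ++ PySem.Int.toStr (PySem.Dict.getD service_count v 0) ++ " ") ""

-- ===== PORT B =====
-- the outer while loop of Source B: emit one piece per run of equal elements of the sorted list;
-- the inner 'while rest[k] == x' counter is the takeWhile length, 'rest = rest[k:]' is the dropWhile
def gussPieces : List String → List String
  | [] => []
  | x :: rest =>
    (x ++ PySem.Int.toStr (((rest.takeWhile (fun y => y == x)).length : Int) + 1) ++ " ")
      :: gussPieces (rest.dropWhile (fun y => y == x))
termination_by l => l.length
decreasing_by
  simpa using Nat.lt_succ_of_le (List.length_dropWhile_le _ rest)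

def get_unique_service_sequence_alt (service_sequence : List String) : String :=
  PySem.Str.join "" (gussPieces (PySem.List.sorted service_sequence (fun x => x) false))

-- ===== PRECONDITION & SPEC =====
def Spec_get_unique_service_sequence (service_sequence : List String) (out : String) : Prop := out = get_unique_service_sequence_alt service_sequence
instance (service_sequence : List String) (out : String) : Decidable (Spec_get_unique_service_sequence service_sequence out) := by unfold Spec_get_unique_service_sequence; infer_instance

-- ===== CLAIM (what is proved, stated in full; the proofs are below) =====
def Claim_equal_get_unique_service_sequence : Prop := ∀ (service_sequence : List String), Dom_get_unique_service_sequence service_sequence → Spec_get_unique_service_sequence service_sequence (get_unique_service_sequence service_sequence)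

-- ===== LEMMAS AND PROOFS =====

-- A's counting loop is Counter: its step equals insert v (getD v 0 + 1)
theorem guss_countD (l : List String) (d : PySem.Dict String Int) (v : String) :
    (l.foldl (fun d v =>
        let d := if (PySem.Dict.get? d v) = none then PySem.Dict.insert d v 0 else d
        PySem.Dict.insert d v (PySem.Dict.getD d v 0 + 1)) d).getD v 0
      = d.getD v 0 + (l.count v : Int) := by
  induction l generalizing d with
  | nil => simp
  | cons x t ih =>
    have hstep :
        (let d' := if (PySem.Dict.get? d x) = none then PySem.Dict.insert d x 0 else d
         PySem.Dict.insert d' x (PySem.Dict.getD d' x 0 + 1))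
        = PySem.Dict.insert d x (PySem.Dict.getD d x 0 + 1) := by
      by_cases h : PySem.Dict.get? d x = none
      · have h0 : PySem.Dict.getD d x 0 = 0 := by
          simp [PySem.Dict.getD_eq_get?_getD, h]
        simp [h, PySem.Dict.insert_insert_self, PySem.Dict.getD_insert_self, h0]
      · simp [h]
    rw [List.foldl_cons]
    show (t.foldl _ (let d' := if (PySem.Dict.get? d x) = none then PySem.Dict.insert d x 0 else d
         PySem.Dict.insert d' x (PySem.Dict.getD d' x 0 + 1))).getD v 0 = _
    rw [hstep, ih, PySem.Dict.getD_insert, List.count_cons]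
    by_cases hvx : v = x
    · simp [hvx]; ring
    · simp [hvx, Ne.symm hvx]

-- A's output loop, at the character level
theorem guss_foldA (d : PySem.Dict String Int) (ks : List String) (acc : String) :
    (ks.foldl (fun result v =>
        result ++ v ++ PySem.Int.toStr (PySem.Dict.getD d v 0) ++ " ") acc).toList
      = acc.toList ++ (ks.map (fun v =>
          v.toList ++ (PySem.Int.toStr (PySem.Dict.getD d v 0)).toList ++ [' '])).flatten := by
  induction ks generalizing acc with
  | nil => simp
  | cons x t ih => simp [ih, List.append_assoc]

theorem guss_join_nil (css : List (List Char)) :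
    PySem.Chars.join [] css = css.flatten := by
  induction css with
  | nil => simp [PySem.Chars.join_nil]
  | cons c t ih =>
    cases t with
    | nil => simp [PySem.Chars.join_singleton]
    | cons b u => rw [PySem.Chars.join_cons_cons] at *; simp_all

-- the run-grouping scan over any ≤-sorted list produces exactly the strictly
-- increasing list of its distinct elements with their multiplicities
theorem guss_main (n : Nat) (s : List String) (hn : s.length ≤ n)
    (hp : s.Pairwise (· ≤ ·)) :
    ∃ ks : List String, ks.Nodup ∧ ks.Pairwise (· < ·) ∧ (∀ v, v ∈ ks ↔ v ∈ s) ∧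
      gussPieces s = ks.map (fun v => v ++ PySem.Int.toStr (s.count v : Int) ++ " ") := by
  induction n generalizing s with
  | zero =>
    have : s = [] := List.eq_nil_of_length_eq_zero (Nat.le_zero.mp hn)
    subst this
    exact ⟨[], by simp [gussPieces]⟩
  | succ n ih =>
    cases s with
    | nil => exact ⟨[], by simp [gussPieces]⟩
    | cons x rest =>
      have hxle : ∀ y ∈ rest, x ≤ y := (List.pairwise_cons.mp hp).1
      have hpr : rest.Pairwise (· ≤ ·) := (List.pairwise_cons.mp hp).2
      set tw := rest.takeWhile (fun y => y == x) with htw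
      set dw := rest.dropWhile (fun y => y == x) with hdw
      have hsplit : tw ++ dw = rest := List.takeWhile_append_dropWhile
      have htwx : ∀ y ∈ tw, y = x := fun y hy => by
        simpa using List.mem_takeWhile_imp hy
      have hdwsub : dw.Sublist rest := List.dropWhile_sublist _
      have hpd : dw.Pairwise (· ≤ ·) := hpr.sublist hdwsub
      -- x does not occur in dw
      have hxdw : x ∉ dw := by
        intro hx
        cases hdweq : dw with
        | nil => rw [hdweq] at hx; simp at hx
        | cons y t =>
          have hne : rest.dropWhile (fun y => y == x) ≠ [] := by
            rw [← hdw, hdweq]; simp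
          have hyne : ¬ (y == x) = true := by
            have h' := List.head_dropWhile_not (fun y => y == x) (l := rest) (w := hne)
            simpa [← hdw, hdweq] using h'
          have hyx : y ≠ x := by simpa using hyne
          have hxy : x ≤ y := hxle y (hdwsub.subset (by rw [hdweq]; simp))
          have hylt : y < x ∨ y = x := by
            rw [hdweq] at hx
            rcases List.mem_cons.mp hx with h | h
            · exact Or.inr h.symm
            · -- x ∈ t, and y ≤ x from pairwise of dw
              have : y ≤ x := by
                rw [hdweq] at hpd
                exact (List.pairwise_cons.mp hpd).1 x h
              exact lt_or_eq_of_le this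
          rcases hylt with h | h
          · exact absurd hxy (not_le_of_gt h)
          · exact hyx h
      have hdn : dw.length ≤ n := by
        have h1 : dw.length ≤ rest.length := List.length_dropWhile_le _ _
        have h2 : rest.length ≤ n := by simpa using Nat.le_of_succ_le_succ hn
        omega
      obtain ⟨ks', hnd', hplt', hmem', heq'⟩ := ih dw hdn hpd
      have hksdw : ∀ v ∈ ks', v ∈ dw := fun v hv => (hmem' v).mp hv
      -- counts
      have h1x : tw.count x = tw.length :=
        List.count_eq_length.mpr (fun y hy => (htwx y hy).symm)
      have h2x : dw.count x = 0 := List.count_eq_zero.mpr hxdw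
      have hcx : ((x :: rest).count x : Int) = (tw.length : Int) + 1 := by
        rw [List.count_cons_self, ← hsplit, List.count_append, h1x, h2x]
        push_cast; ring
      have hcv : ∀ v ∈ ks', ((x :: rest).count v : Int) = (dw.count v : Int) := by
        intro v hv
        have hvdw := hksdw v hv
        have hvx : v ≠ x := fun h => hxdw (h ▸ hvdw)
        have h1 : tw.count v = 0 :=
          List.count_eq_zero.mpr (fun hvt => hvx (htwx v hvt))
        have hc : (x :: rest).count v = dw.count v := by
          rw [← hsplit, List.count_cons, List.count_append, h1]
          simp [Ne.symm hvx]
        rw [hc]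
      refine ⟨x :: ks', ?_, ?_, ?_, ?_⟩
      · exact List.nodup_cons.mpr ⟨fun hx => hxdw (hksdw x hx), hnd'⟩
      · refine List.pairwise_cons.mpr ⟨?_, hplt'⟩
        intro v hv
        have hvdw := hksdw v hv
        have hvx : v ≠ x := fun h => hxdw (h ▸ hvdw)
        have : x ≤ v := hxle v (hdwsub.subset hvdw)
        exact lt_of_le_of_ne this (fun h => hvx h.symm)
      · intro v
        constructor
        · intro hv
          rcases List.mem_cons.mp hv with h | h
          · exact h ▸ List.mem_cons_self
          · exact List.mem_cons_of_mem x (hdwsub.subset ((hmem' v).mp h))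
        · intro hv
          rcases List.mem_cons.mp hv with h | h
          · exact h ▸ List.mem_cons_self
          · rw [← hsplit] at h
            rcases List.mem_append.mp h with h | h
            · exact (htwx v h) ▸ List.mem_cons_self
            · exact List.mem_cons_of_mem x ((hmem' v).mpr h)
      · show gussPieces (x :: rest) = _
        rw [gussPieces]
        simp only [List.map_cons]
        congr 1
        · rw [← htw, hcx]
        · rw [heq']
          exact List.map_congr_left (fun v hv => by rw [hcv v hv])

-- ===== VERDICT (by name: the statement is the Claim_ definition above) =====
theorem get_unique_service_sequence_spec : Claim_equal_get_unique_service_sequence := by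
  unfold Claim_equal_get_unique_service_sequence
  intro l _
  unfold Spec_get_unique_service_sequence
  simp only [get_unique_service_sequence, get_unique_service_sequence_alt]
  apply String.toList_injective
  set s := PySem.List.sorted l (fun x => x) false with hs
  have hp : s.Pairwise (· ≤ ·) := PySem.List.sorted_pairwise l (fun x => x)
  obtain ⟨ks, hnd, hplt, hmem, heq⟩ := guss_main s.length s le_rfl hp
  have hperm : s.Perm l := PySem.List.sorted_perm l (fun x => x) false
  -- A's key list is exactly ks
  have hkeys : PySem.List.sorted (PySem.Set.ofList l) (fun x => x) false = ks := by
    apply PySem.List.sorted_eq_of_perm_of_pairwise_lt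
    · rw [List.perm_ext_iff_of_nodup hnd (PySem.Set.nodup_ofList l)]
      intro v
      rw [hmem v, PySem.List.mem_sorted, PySem.Set.mem_ofList]
    · exact hplt
  have hcnt : ∀ v, s.count v = l.count v := fun v => hperm.count_eq v
  rw [hkeys, guss_foldA, heq]
  have h0 : ("" : String).toList = ([] : List Char) := rfl
  have hsp : (" " : String).toList = [' '] := rfl
  simp only [PySem.Str.toList_join, h0, guss_join_nil, List.map_map, List.nil_append]
  congr 1
  apply List.map_congr_left
  intro v _
  simp [Function.comp, String.toList_append, hsp, guss_countD, hcnt v]
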